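-- pv_equiv track=rewrite | github.com/microprediction/entityidentity | entityidentity/shared_utils.py | expand_aliases
-- ===== SOURCE A (Python) =====
-- from typing import Dict, List, Optional
--
-- def expand_aliases(aliases: Optional[List[str]], max_columns: int = 10) -> Dict[str, str]:
--     """
--     Expand aliases list into alias1...alias10 columns.
--
--     Args:
--         aliases: List of alias strings
--         max_columns: Maximum number of alias columns to generate (default: 10)
--
--     Returns:
--         Dictionary mapping alias1...alias{max_columns} to values
--
--     Examples:
--         >>> expand_aliases(['Pt', 'platinum', 'platina'])
--         {'alias1': 'Pt', 'alias2': 'platinum', 'alias3': 'platina',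
--          'alias4': '', 'alias5': '', ...}
--
--         >>> expand_aliases(None)
--         {'alias1': '', 'alias2': '', ...}
--     """
--     result = {}
--     if not aliases:
--         aliases = []
--
--     for i in range(1, max_columns + 1):
--         col_name = f"alias{i}"
--         if i <= len(aliases):
--             result[col_name] = str(aliases[i - 1])
--         else:
--             result[col_name] = ""
--
--     return result
-- ===== SOURCE B (Python) =====
-- def expand_aliases(aliases, max_columns=10):
--     # Phase 1: a complete blank table of all columns.
--     result = {f"alias{i}": "" for i in range(1, max_columns + 1)}
--     # Phase 2: overwrite the leading slots in place with the alias values.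
--     i = 1
--     for a in (aliases or []):
--         if i > max_columns:
--             break
--         result[f"alias{i}"] = str(a)
--         i += 1
--     return result
-- ===== Notes on version B (the rewrite author's own statement) =====
-- stated objective: alternative
-- what changed: B is two-phase: it first builds the complete blank table alias1..N -> '' and then a second pass walks the alias list overwriting the leading slots in place (relying on dict overwrite keeping insertion position), breaking when columns run out, instead of A's single pass that decides each column's value with a per-column bounds test.
import Mathlib
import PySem

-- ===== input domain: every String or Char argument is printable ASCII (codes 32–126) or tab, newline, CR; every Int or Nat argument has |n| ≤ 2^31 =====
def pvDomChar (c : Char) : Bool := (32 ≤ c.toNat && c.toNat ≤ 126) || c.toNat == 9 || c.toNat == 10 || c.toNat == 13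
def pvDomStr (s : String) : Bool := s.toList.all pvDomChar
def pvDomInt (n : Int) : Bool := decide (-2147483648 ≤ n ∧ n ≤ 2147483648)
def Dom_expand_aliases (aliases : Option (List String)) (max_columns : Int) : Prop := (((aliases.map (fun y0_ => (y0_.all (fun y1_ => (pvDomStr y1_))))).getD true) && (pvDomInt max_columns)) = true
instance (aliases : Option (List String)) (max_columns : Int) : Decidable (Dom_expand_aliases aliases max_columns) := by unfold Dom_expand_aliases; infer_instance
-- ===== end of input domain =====

-- B replaces A's single conditional pass by two phases — build the complete blank table first,
-- then overwrite its leading slots in place from the alias list (simpler decomposition, same cost).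

-- ===== PORT A =====
-- 'if not aliases: aliases = []' : both None and [] become [] (getD [] is exact since [] stays []).
-- str(aliases[i-1]) on a str is the identity; the index i-1 is always in range under the guard
-- 'i <= len(aliases)', so pyGetD (whose default is never used) is exact there.
def expand_aliases (aliases : Option (List String)) (max_columns : Int) : List (String × String) :=
  ((PySem.List.pyRange 1 (max_columns + 1) 1).foldl
    (fun result i =>
      if i ≤ ((aliases.getD []).length : Int) then
        result.insert ("alias" ++ PySem.Int.toStr i) (PySem.List.pyGetD (aliases.getD []) (i - 1) "")
      else
        result.insert ("alias" ++ PySem.Int.toStr i) "")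
    PySem.Dict.empty).items

-- ===== PORT B =====
-- Phase 2 of Source B: 'for a in (aliases or []): if i > max_columns: break; result[f"alias{i}"] = str(a); i += 1'
-- (a for loop with a break = structural recursion on the list that stops at the guard).
def pvFillLoop (mc : Int) (xs : List String) (d : PySem.Dict String String) (i : Int) :
    PySem.Dict String String :=
  match xs with
  | [] => d
  | a :: rest =>
    if mc < i then d
    else pvFillLoop mc rest (d.insert ("alias" ++ PySem.Int.toStr i) a) (i + 1)

def expand_aliases_alt (aliases : Option (List String)) (max_columns : Int) : List (String × String) :=
  (pvFillLoop max_columns (aliases.getD [])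
    ((PySem.List.pyRange 1 (max_columns + 1) 1).foldl
      (fun result i => result.insert ("alias" ++ PySem.Int.toStr i) "")
      PySem.Dict.empty)
    1).items

-- ===== PRECONDITION & SPEC =====
def Spec_expand_aliases (aliases : Option (List String)) (max_columns : Int) (out : List (String × String)) : Prop := out = expand_aliases_alt aliases max_columns
instance (aliases : Option (List String)) (max_columns : Int) (out : List (String × String)) : Decidable (Spec_expand_aliases aliases max_columns out) := by unfold Spec_expand_aliases; infer_instance

-- ===== CLAIM (what is proved, stated in full; the proofs are below) =====
def Claim_equal_expand_aliases : Prop := ∀ (aliases : Option (List String)) (max_columns : Int), Dom_expand_aliases aliases max_columns → Spec_expand_aliases aliases max_columns (expand_aliases aliases max_columns)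

-- ===== LEMMAS AND PROOFS =====

-- decoding a decimal digit string, to prove str(n) injective on positives (no such lemma exists in the library)
def pvDecode (cs : List Char) : Nat := cs.foldl (fun a c => a * 10 + (c.toNat - 48)) 0

theorem pvToDigitsCore_append (f : Nat) : ∀ (n : Nat) (ds : List Char),
    Nat.toDigitsCore 10 f n ds = Nat.toDigitsCore 10 f n [] ++ ds := by
  induction f with
  | zero => intro n ds; simp [Nat.toDigitsCore]
  | succ f ih =>
    intro n ds
    simp only [Nat.toDigitsCore]
    by_cases h : n / 10 = 0
    · simp [h]
    · simp only [h, if_false]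
      rw [ih (n / 10) ((n % 10).digitChar :: ds), ih (n / 10) ((n % 10).digitChar :: [])]
      simp

theorem pvDecode_digitChar (k : Nat) (h : k < 10) : (Nat.digitChar k).toNat - 48 = k := by
  interval_cases k <;> decide

theorem pvDecode_toDigitsCore (f : Nat) : ∀ n : Nat, n < f →
    pvDecode (Nat.toDigitsCore 10 f n []) = n := by
  induction f with
  | zero => omega
  | succ f ih =>
    intro n hn
    simp only [Nat.toDigitsCore]
    by_cases h : n / 10 = 0
    · have h10 : n < 10 := by omega
      have hmod : n % 10 = n := Nat.mod_eq_of_lt h10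
      simp only [h, if_true, hmod, pvDecode, List.foldl]
      rw [pvDecode_digitChar n h10]
      omega
    · simp only [h, if_false]
      rw [pvToDigitsCore_append]
      have hlt : n / 10 < f := by
        have := Nat.div_lt_self (by omega : 0 < n) (by omega : 1 < 10)
        omega
      have hdec := ih (n / 10) hlt
      simp only [pvDecode, List.foldl_append] at *
      rw [hdec]
      simp only [List.foldl]
      rw [pvDecode_digitChar (n % 10) (Nat.mod_lt n (by omega))]
      omega

theorem pvToDigits_inj (a b : Nat) (h : Nat.toDigits 10 a = Nat.toDigits 10 b) : a = b := by
  have ha := pvDecode_toDigitsCore (a + 1) a (by omega)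
  have hb := pvDecode_toDigitsCore (b + 1) b (by omega)
  unfold Nat.toDigits at h
  rw [← ha, ← hb, h]

theorem pvKey_inj (i j : Int) (hi : 0 < i) (hj : 0 < j)
    (h : "alias" ++ PySem.Int.toStr i = "alias" ++ PySem.Int.toStr j) : i = j := by
  have h1 : ("alias" ++ PySem.Int.toStr i).toList = ("alias" ++ PySem.Int.toStr j).toList := by
    rw [h]
  rw [String.toList_append, String.toList_append, PySem.Int.toList_toStr, PySem.Int.toList_toStr]
    at h1
  have h2 : PySem.Int.toChars i = PySem.Int.toChars j := List.append_cancel_left h1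
  unfold PySem.Int.toChars at h2
  rw [if_neg (by omega), if_neg (by omega)] at h2
  have := pvToDigits_inj i.toNat j.toNat h2
  omega

-- A's loop value for column i
def pvValA (al : List String) (i : Int) : String :=
  if i ≤ (al.length : Int) then PySem.List.pyGetD al (i - 1) "" else ""

-- keys of the column range are pairwise distinct
theorem pvNodup_keys (mc : Int) :
    ((PySem.List.pyRange 1 (mc + 1) 1).map (fun i => "alias" ++ PySem.Int.toStr i)).Nodup := by
  apply List.Nodup.map_on _ (PySem.List.nodup_pyRange_one 1 (mc + 1))
  intro x hx y hy hxy
  rw [PySem.List.mem_pyRange_one] at hx hy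
  exact pvKey_inj x y (by omega) (by omega) hxy

-- A's dict: fresh distinct keys inserted into empty, so its items are the mapped range
theorem pvItemsA (al : List String) (mc : Int) :
    ((PySem.List.pyRange 1 (mc + 1) 1).foldl
      (fun result i =>
        if i ≤ (al.length : Int) then
          result.insert ("alias" ++ PySem.Int.toStr i) (PySem.List.pyGetD al (i - 1) "")
        else
          result.insert ("alias" ++ PySem.Int.toStr i) "")
      PySem.Dict.empty).items =
    (PySem.List.pyRange 1 (mc + 1) 1).map (fun i => ("alias" ++ PySem.Int.toStr i, pvValA al i)) := by
  have hcongr : (PySem.List.pyRange 1 (mc + 1) 1).foldl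
      (fun result i =>
        if i ≤ (al.length : Int) then
          result.insert ("alias" ++ PySem.Int.toStr i) (PySem.List.pyGetD al (i - 1) "")
        else
          result.insert ("alias" ++ PySem.Int.toStr i) "")
      PySem.Dict.empty =
      (PySem.List.pyRange 1 (mc + 1) 1).foldl
      (fun result i => result.insert ("alias" ++ PySem.Int.toStr i) (pvValA al i))
      PySem.Dict.empty := by
    apply PySem.List.foldl_congr_mem
    intro acc x _
    unfold pvValA
    split_ifs <;> rfl
  have hfresh := PySem.Dict.items_foldl_insert_fresh (PySem.List.pyRange 1 (mc + 1) 1)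
    (fun i => "alias" ++ PySem.Int.toStr i) (fun i => pvValA al i) PySem.Dict.empty
    (fun a _ => PySem.Dict.contains_empty _) (pvNodup_keys mc)
  rw [hcongr]
  simpa using hfresh

-- the blank dict of phase 1: its items are the range mapped to empty values
theorem pvItemsBlank (mc : Int) :
    ((PySem.List.pyRange 1 (mc + 1) 1).foldl
      (fun result i => result.insert ("alias" ++ PySem.Int.toStr i) "")
      PySem.Dict.empty).items =
    (PySem.List.pyRange 1 (mc + 1) 1).map (fun i => ("alias" ++ PySem.Int.toStr i, "")) := by
  have hfresh := PySem.Dict.items_foldl_insert_fresh (PySem.List.pyRange 1 (mc + 1) 1)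
    (fun i => "alias" ++ PySem.Int.toStr i) (fun _ => "") PySem.Dict.empty
    (fun a _ => PySem.Dict.contains_empty _) (pvNodup_keys mc)
  simpa using hfresh

-- the overwrite loop never adds or removes a key (every slot it touches already exists)
theorem pvFill_keys (mc : Int) : ∀ (xs : List String) (d : PySem.Dict String String) (i : Int),
    (∀ j : Int, i ≤ j → j ≤ mc → d.contains ("alias" ++ PySem.Int.toStr j) = true) →
    (pvFillLoop mc xs d i).keys = d.keys := by
  intro xs
  induction xs with
  | nil => intro d i _; rfl
  | cons a rest ih =>
    intro d i hc
    unfold pvFillLoop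
    by_cases hmc : mc < i
    · simp [hmc]
    · simp only [hmc, if_false]
      rw [ih _ _ (by
        intro j hj1 hj2
        rw [PySem.Dict.contains_insert]
        rw [hc j (by omega) hj2]
        simp)]
      exact PySem.Dict.keys_insert_of_contains d a (hc i le_rfl (by omega))

-- what the overwrite loop leaves at each key
theorem pvFill_getD (mc : Int) : ∀ (xs : List String) (d : PySem.Dict String String) (i j : Int),
    0 < i → 0 < j →
    (pvFillLoop mc xs d i).getD ("alias" ++ PySem.Int.toStr j) "" =
      if i ≤ j ∧ j ≤ mc ∧ j - i < (xs.length : Int) then xs.getD (j - i).toNat ""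
      else d.getD ("alias" ++ PySem.Int.toStr j) "" := by
  intro xs
  induction xs with
  | nil =>
    intro d i j _ _
    simp only [pvFillLoop, List.length_nil]
    rw [if_neg (by omega)]
  | cons a rest ih =>
    intro d i j hi hj
    have hlen : ((a :: rest).length : Int) = (rest.length : Int) + 1 := by
      simp only [List.length_cons]; push_cast; ring
    unfold pvFillLoop
    by_cases hmc : mc < i
    · rw [if_pos hmc, if_neg (by omega)]
    · rw [if_neg hmc, ih _ (i + 1) j (by omega) hj]
      by_cases hji : j = i
      · subst hji
        rw [if_neg (by omega), if_pos ⟨le_rfl, by omega, by omega⟩,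
          PySem.Dict.getD_insert_self]
        have h0 : (j - j).toNat = 0 := by omega
        rw [h0]
        rfl
      · have hne : ("alias" ++ PySem.Int.toStr j) ≠ ("alias" ++ PySem.Int.toStr i) := by
          intro h; exact hji (pvKey_inj j i hj hi h)
        rw [PySem.Dict.getD_insert_of_ne d a "" hne]
        by_cases hC : i ≤ j ∧ j ≤ mc ∧ j - i < ((a :: rest).length : Int)
        · rw [if_pos ⟨by omega, hC.2.1, by omega⟩, if_pos hC]
          have h1 : (j - i).toNat = (j - (i + 1)).toNat + 1 := by omega
          rw [h1, List.getD_cons_succ]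
        · rw [if_neg (by intro hx; exact hC ⟨by omega, hx.2.1, by omega⟩), if_neg hC]

-- the whole of B, at the items level: same mapped range as A
theorem pvItemsB (al : List String) (mc : Int) :
    (pvFillLoop mc al
      ((PySem.List.pyRange 1 (mc + 1) 1).foldl
        (fun result i => result.insert ("alias" ++ PySem.Int.toStr i) "")
        PySem.Dict.empty)
      1).items =
    (PySem.List.pyRange 1 (mc + 1) 1).map (fun i => ("alias" ++ PySem.Int.toStr i, pvValA al i)) := by
  have hitems0 := pvItemsBlank mc
  have hkeys0 : ((PySem.List.pyRange 1 (mc + 1) 1).foldl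
      (fun result i => result.insert ("alias" ++ PySem.Int.toStr i) "")
      PySem.Dict.empty).keys =
      (PySem.List.pyRange 1 (mc + 1) 1).map (fun i => "alias" ++ PySem.Int.toStr i) := by
    simp only [PySem.Dict.keys]
    rw [hitems0, List.map_map]
    rfl
  have hnodup0 : ((PySem.List.pyRange 1 (mc + 1) 1).foldl
      (fun result i => result.insert ("alias" ++ PySem.Int.toStr i) "")
      PySem.Dict.empty).keys.Nodup := by
    rw [hkeys0]; exact pvNodup_keys mc
  have hcont0 : ∀ j : Int, 1 ≤ j → j ≤ mc →
      ((PySem.List.pyRange 1 (mc + 1) 1).foldl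
        (fun result i => result.insert ("alias" ++ PySem.Int.toStr i) "")
        PySem.Dict.empty).contains ("alias" ++ PySem.Int.toStr j) = true := by
    intro j h1 h2
    rw [PySem.Dict.contains_iff_mem_keys, hkeys0]
    exact List.mem_map_of_mem (by rw [PySem.List.mem_pyRange_one]; omega)
  have hkeysB := pvFill_keys mc al _ 1 (fun j hj1 hj2 => hcont0 j hj1 hj2)
  have hnodupB : (pvFillLoop mc al
      ((PySem.List.pyRange 1 (mc + 1) 1).foldl
        (fun result i => result.insert ("alias" ++ PySem.Int.toStr i) "")
        PySem.Dict.empty) 1).keys.Nodup := by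
    rw [hkeysB]; exact hnodup0
  rw [PySem.Dict.items_eq_map_keys _ hnodupB "", hkeysB, hkeys0, List.map_map]
  apply List.map_congr_left
  intro j hjK
  have hjr := PySem.List.mem_pyRange_one.mp hjK
  simp only [Function.comp_apply]
  rw [pvFill_getD mc al _ 1 j (by omega) (by omega)]
  unfold pvValA
  by_cases hl : j ≤ (al.length : Int)
  · rw [if_pos ⟨by omega, by omega, by omega⟩, if_pos hl]
    rw [PySem.List.pyGetD_eq_getElem al "" (by omega) (by omega),
      List.getD_eq_getElem al "" (by omega)]
  · rw [if_neg (by omega), if_neg hl]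
    have hmem : ("alias" ++ PySem.Int.toStr j, "") ∈
        ((PySem.List.pyRange 1 (mc + 1) 1).foldl
          (fun result i => result.insert ("alias" ++ PySem.Int.toStr i) "")
          PySem.Dict.empty).items := by
      rw [hitems0]; exact List.mem_map_of_mem hjK
    rw [PySem.Dict.getD_of_mem_items _ hmem hnodup0 ""]

-- ===== VERDICT (by name: the statement is the Claim_ definition above) =====
theorem expand_aliases_spec : Claim_equal_expand_aliases := by
  intro aliases mc _
  unfold Spec_expand_aliases expand_aliases expand_aliases_alt
  rw [pvItemsA (aliases.getD []) mc, pvItemsB (aliases.getD []) mc]
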